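-- pv_equiv track=rewrite | github.com/aaroncc9/bitboard_heuristic_solver | AlphaBeta.py | generate_white_moves
-- ===== SOURCE A (Python) =====
-- def generate_white_moves(board):
--     moves = []
--     board_list = list(board)
--
--     for i in range(len(board)):
--         if board[i] in ['w', 'W']:
--             # Create a copy of the board to simulate move
--             new_board = board_list.copy()
--
--             # Move out of board
--             if i == 15:
--                 new_board[i] = 'x'
--                 moves.append(''.join(new_board))
--                 continue
--
--             # Move one forward
--             if i+1 < len(board) and board[i+1] == 'x':
--                 new_board[i+1] = board[i]
--                 new_board[i] = 'x'
--                 moves.append(''.join(new_board))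
--                 continue
--
--             # Jump
--             # Find the next empty square to the right
--             j = i + 1
--             while j < len(board) and board[j] != 'x':
--                 j += 1
--
--             # Jump out of board
--             if j >= len(board):
--                 new_board[i] = 'x'
--                 moves.append(''.join(new_board))
--                 continue
--
--             # Regular jump
--             new_board[j] = board[i]
--             new_board[i] = 'x'
--
--             # Check if jump is over one black piece
--             if j - i == 2 and board[i+1] in ['b', 'B']:
--                 # Find the rightmost empty square
--                 k = len(board) - 1
--                 while k >= 0 and board[k] != 'x':
--                     k -= 1
--
--                 if k >= 0:  # If there is an empty square
--                     new_board[k] = board[i+1]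
--                     new_board[i+1] = 'x'
--
--             moves.append(''.join(new_board))
--
--     return moves
-- ===== SOURCE B (Python) =====
-- def generate_white_moves(board):
--     n = len(board)
--     cells = list(board)
--
--     # next empty square at-or-after each index, built in one backward pass
--     nxt = []
--     nx = n
--     for i in range(n - 1, -1, -1):
--         if cells[i] == 'x':
--             nx = i
--         nxt.append(nx)
--     nxt.reverse()
--
--     # rightmost empty square (once), -1 if none
--     k = max((i for i in range(n) if cells[i] == 'x'), default=-1)
--
--     def make_move(i, c):
--         nb = cells.copy()
--         if i == 15:
--             nb[i] = 'x'
--         elif i + 1 < n and cells[i + 1] == 'x':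
--             nb[i + 1] = c
--             nb[i] = 'x'
--         else:
--             j = nxt[i + 1] if i + 1 < n else i + 1
--             if j >= n:
--                 nb[i] = 'x'
--             else:
--                 nb[j] = c
--                 nb[i] = 'x'
--                 if j - i == 2 and cells[i + 1] in ('b', 'B') and k >= 0:
--                     nb[k] = cells[i + 1]
--                     nb[i + 1] = 'x'
--         return ''.join(nb)
--
--     return [make_move(i, c) for i, c in enumerate(cells) if c in ('w', 'W')]
-- ===== Notes on version B (the rewrite author's own statement) =====
-- stated objective: alternative
-- what changed: Replaced the two nested while-scans with a precomputed next-empty-to-the-right table (one backward pass) and a single rightmost-empty index computed once, then a comprehension over enumerate with O(1) lookups instead of per-piece rescans.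
import Mathlib
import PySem

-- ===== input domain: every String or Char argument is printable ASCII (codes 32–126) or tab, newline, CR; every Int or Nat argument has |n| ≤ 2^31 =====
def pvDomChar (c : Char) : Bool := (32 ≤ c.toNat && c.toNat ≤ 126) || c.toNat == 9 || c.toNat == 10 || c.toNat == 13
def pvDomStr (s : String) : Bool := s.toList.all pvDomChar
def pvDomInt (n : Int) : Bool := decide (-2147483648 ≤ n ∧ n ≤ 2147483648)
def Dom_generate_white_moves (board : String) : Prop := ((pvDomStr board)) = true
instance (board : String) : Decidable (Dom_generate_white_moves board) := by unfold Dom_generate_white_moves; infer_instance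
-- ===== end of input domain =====

-- B replaces A's per-piece nested while-scans by a next-empty table built in one
-- backward pass plus a single rightmost-empty index (alternative decomposition,
-- same results in the same order).

-- ===== PORT A =====
-- A's inner while loop: j = start; while j < len and board[j] != 'x': j += 1
def pvScanR (chars : List Char) (j : Int) : Int :=
  if h : j < (chars.length : Int) ∧ PySem.List.pyGetD chars j ' ' ≠ 'x' then
    pvScanR chars (j + 1)
  else j
termination_by ((chars.length : Int) - j).toNat
decreasing_by omega

-- A's inner while loop: k = len-1; while k >= 0 and board[k] != 'x': k -= 1
def pvScanL (chars : List Char) (k : Int) : Int :=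
  if h : 0 ≤ k ∧ PySem.List.pyGetD chars k ' ' ≠ 'x' then
    pvScanL chars (k - 1)
  else k
termination_by (k + 1).toNat
decreasing_by omega

-- the body of A's for-loop for one white piece at i (the continue-chain as nested ifs)
def pvMoveA (chars : List Char) (n i : Int) : String :=
  if i = 15 then
    String.ofList (PySem.List.pySetD chars i 'x')
  else if i + 1 < n ∧ PySem.List.pyGetD chars (i + 1) ' ' = 'x' then
    String.ofList (PySem.List.pySetD (PySem.List.pySetD chars (i + 1) (PySem.List.pyGetD chars i ' ')) i 'x')
  else
    let j := pvScanR chars (i + 1)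
    if n ≤ j then
      String.ofList (PySem.List.pySetD chars i 'x')
    else
      let nb := PySem.List.pySetD (PySem.List.pySetD chars j (PySem.List.pyGetD chars i ' ')) i 'x'
      if j - i = 2 ∧ (PySem.List.pyGetD chars (i + 1) ' ' = 'b' ∨ PySem.List.pyGetD chars (i + 1) ' ' = 'B') then
        let k := pvScanL chars (n - 1)
        if 0 ≤ k then
          String.ofList (PySem.List.pySetD (PySem.List.pySetD nb k (PySem.List.pyGetD chars (i + 1) ' ')) (i + 1) 'x')
        else String.ofList nb
      else String.ofList nb

def generate_white_moves (board : String) : List String :=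
  let chars := board.toList
  let n : Int := PySem.List.len chars
  (PySem.List.pyRange 0 n 1).foldl
    (fun moves i =>
      if PySem.List.pyGetD chars i ' ' = 'w' ∨ PySem.List.pyGetD chars i ' ' = 'W' then
        moves ++ [pvMoveA chars n i]
      else moves) []

-- ===== PORT B =====
-- nxt[i] = next empty square at-or-after i, one backward pass (append then reverse)
def pvNxt (chars : List Char) : List Int :=
  let n : Int := PySem.List.len chars
  ((PySem.List.pyRange (n - 1) (-1) (-1)).foldl
    (fun (st : List Int × Int) i =>
      let nx := if PySem.List.pyGetD chars i ' ' = 'x' then i else st.2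
      (st.1 ++ [nx], nx)) ([], n)).1.reverse

-- k = max((i for i in range(n) if cells[i] == 'x'), default=-1)
def pvKmax (chars : List Char) : Int :=
  PySem.List.maxD
    ((PySem.List.pyRange 0 (PySem.List.len chars) 1).filter
      (fun i => decide (PySem.List.pyGetD chars i ' ' = 'x')))
    (fun x => x) (-1)

-- make_move(i, c): table lookups instead of scans
def pvMoveB (chars : List Char) (n : Int) (nxt : List Int) (k : Int) (i : Int) (c : Char) : String :=
  if i = 15 then
    String.ofList (PySem.List.pySetD chars i 'x')
  else if i + 1 < n ∧ PySem.List.pyGetD chars (i + 1) ' ' = 'x' then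
    String.ofList (PySem.List.pySetD (PySem.List.pySetD chars (i + 1) c) i 'x')
  else
    let j := if i + 1 < n then PySem.List.pyGetD nxt (i + 1) 0 else i + 1
    if n ≤ j then
      String.ofList (PySem.List.pySetD chars i 'x')
    else
      let nb := PySem.List.pySetD (PySem.List.pySetD chars j c) i 'x'
      if j - i = 2 ∧ (PySem.List.pyGetD chars (i + 1) ' ' = 'b' ∨ PySem.List.pyGetD chars (i + 1) ' ' = 'B') ∧ 0 ≤ k then
        String.ofList (PySem.List.pySetD (PySem.List.pySetD nb k (PySem.List.pyGetD chars (i + 1) ' ')) (i + 1) 'x')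
      else String.ofList nb

def generate_white_moves_alt (board : String) : List String :=
  let chars := board.toList
  let n : Int := PySem.List.len chars
  let nxt := pvNxt chars
  let k := pvKmax chars
  ((PySem.List.enumerate chars).filter (fun p => decide (p.2 = 'w' ∨ p.2 = 'W'))).map
    (fun p => pvMoveB chars n nxt k p.1 p.2)

-- ===== PRECONDITION & SPEC =====
def Spec_generate_white_moves (board : String) (out : List String) : Prop := out = generate_white_moves_alt board
instance (board : String) (out : List String) : Decidable (Spec_generate_white_moves board out) := by unfold Spec_generate_white_moves; infer_instance

-- ===== CLAIM (what is proved, stated in full; the proofs are below) =====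
def Claim_equal_generate_white_moves : Prop := ∀ (board : String), Dom_generate_white_moves board → Spec_generate_white_moves board (generate_white_moves board)

-- ===== LEMMAS AND PROOFS =====

theorem pvScanR_stop (chars : List Char) (j : Int) (h : (chars.length : Int) ≤ j) :
    pvScanR chars j = j := by
  unfold pvScanR
  rw [dif_neg]
  omega

theorem pvNxt_inv (chars : List Char) : ∀ (m : Nat), m ≤ chars.length → ∀ (acc : List Int)
    (nx : Int), nx = pvScanR chars (m : Int) →
    ((List.range m).map (fun k : Nat => (m : Int) - 1 - k)).foldl
      (fun (st : List Int × Int) i =>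
        let nx := if PySem.List.pyGetD chars i ' ' = 'x' then i else st.2
        (st.1 ++ [nx], nx)) (acc, nx)
    = (acc ++ ((List.range m).map (fun t : Nat => pvScanR chars (t : Int))).reverse,
        pvScanR chars 0) := by
  intro m
  induction m with
  | zero => intro _ acc nx hnx; simpa using hnx
  | succ m ih =>
    intro hm acc nx hnx
    have hsplit : (List.range (m + 1)).map (fun k : Nat => ((m + 1 : Nat) : Int) - 1 - k)
        = (m : Int) :: (List.range m).map (fun k : Nat => ((m : Nat) : Int) - 1 - k) := by
      rw [List.range_succ_eq_map, List.map_cons, List.map_map]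
      congr 1
      · push_cast; ring
      · apply List.map_congr_left
        intro k _
        simp only [Function.comp]
        push_cast; ring
    rw [hsplit, List.foldl_cons]
    have hnx' : (if PySem.List.pyGetD chars (m : Int) ' ' = 'x' then (m : Int) else nx)
        = pvScanR chars (m : Int) := by
      by_cases hx : PySem.List.pyGetD chars (m : Int) ' ' = 'x'
      · rw [if_pos hx]
        conv_rhs => unfold pvScanR
        rw [dif_neg (fun h => h.2 hx)]
      · rw [if_neg hx, hnx, show ((m + 1 : Nat) : Int) = (m : Int) + 1 by push_cast; ring]
        conv_rhs => unfold pvScanR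
        rw [dif_pos ⟨by omega, hx⟩]
    dsimp only
    rw [hnx']
    rw [ih (by omega) (acc ++ [pvScanR chars (m : Int)]) _ rfl]
    simp [List.range_succ, List.reverse_append]

theorem pvNxt_eq (chars : List Char) :
    pvNxt chars = (List.range chars.length).map (fun t : Nat => pvScanR chars (t : Int)) := by
  unfold pvNxt
  simp only [PySem.List.len_eq]
  have hD : PySem.List.pyRange ((chars.length : Int) - 1) (-1) (-1)
      = (List.range chars.length).map (fun k : Nat => (chars.length : Int) - 1 - k) := by
    have h2 : ((chars.length : Int) - 1 - (-1)).toNat = chars.length := by omega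
    rw [PySem.List.pyRange_neg_one, h2]
  rw [hD, pvNxt_inv chars chars.length le_rfl [] _ (pvScanR_stop chars _ le_rfl).symm]
  simp

theorem pvMaxD_append (l : List Int) (b d : Int) (hb : ∀ y ∈ l, y ≤ b) :
    PySem.List.maxD (l ++ [b]) (fun x => x) d = b := by
  cases l with
  | nil => simp [PySem.List.maxD, PySem.List.max?_id_cons]
  | cons x t =>
    rw [List.cons_append]
    simp only [PySem.List.maxD, PySem.List.max?_id_cons, Option.getD_some]
    have hub : List.foldl max x (t ++ [b]) ≤ b := by
      rcases PySem.List.foldl_max_mem (t ++ [b]) x with h | h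
      · rw [h]; exact hb x List.mem_cons_self
      · rcases List.mem_append.mp h with h' | h'
        · exact hb _ (List.mem_cons_of_mem _ h')
        · exact le_of_eq (List.mem_singleton.mp h')
    have hlb : b ≤ List.foldl max x (t ++ [b]) :=
      (PySem.List.le_foldl_max (t ++ [b]) x).2 b (List.mem_append.mpr (Or.inr List.mem_cons_self))
    exact le_antisymm hub hlb

theorem pvKmax_inv (chars : List Char) : ∀ (M : Nat), M ≤ chars.length →
    PySem.List.maxD ((PySem.List.pyRange 0 (M : Int) 1).filter
        (fun i => decide (PySem.List.pyGetD chars i ' ' = 'x'))) (fun x => x) (-1)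
      = pvScanL chars ((M : Int) - 1) := by
  intro M
  induction M with
  | zero =>
    intro _
    simp only [Nat.cast_zero]
    rw [PySem.List.pyRange_one_eq_nil le_rfl, List.filter_nil]
    have h1 : PySem.List.maxD ([] : List Int) (fun x => x) (-1) = -1 := rfl
    rw [h1]
    unfold pvScanL
    rw [dif_neg (fun h => by omega)]
    norm_num
  | succ M ih =>
    intro hM
    have hcast : ((M + 1 : Nat) : Int) = (M : Int) + 1 := by push_cast; ring
    rw [hcast, show ((M : Int) + 1 - 1) = (M : Int) by ring,
        PySem.List.pyRange_one_succ_right (by omega), List.filter_append]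
    by_cases hx : PySem.List.pyGetD chars (M : Int) ' ' = 'x'
    · have hd : (decide (PySem.List.pyGetD chars ((M : Nat) : Int) ' ' = 'x')) = true := decide_eq_true hx
      rw [show (List.filter (fun i => decide (PySem.List.pyGetD chars i ' ' = 'x')) [((M : Nat) : Int)]) = [((M : Nat) : Int)] by rw [List.filter_cons, List.filter_nil, hd]; rfl]
      rw [pvMaxD_append]
      · conv_rhs => unfold pvScanL
        rw [dif_neg (fun h => h.2 hx)]
      · intro y hy
        have := PySem.List.mem_pyRange_one.mp (List.mem_of_mem_filter hy)
        omega
    · have hd : (decide (PySem.List.pyGetD chars ((M : Nat) : Int) ' ' = 'x')) = false := decide_eq_false hx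
      rw [show (List.filter (fun i => decide (PySem.List.pyGetD chars i ' ' = 'x')) [((M : Nat) : Int)]) = [] by rw [List.filter_cons, List.filter_nil, hd]; rfl]
      rw [List.append_nil, ih (by omega)]
      conv_rhs => unfold pvScanL
      rw [dif_pos ⟨by omega, hx⟩]

theorem pvKmax_eq (chars : List Char) :
    pvKmax chars = pvScanL chars ((chars.length : Int) - 1) := by
  unfold pvKmax
  simp only [PySem.List.len_eq]
  exact pvKmax_inv chars chars.length le_rfl

theorem pvMove_eq (chars : List Char) (i : Int) (h0 : 0 ≤ i) (h1 : i < (chars.length : Int)) :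
    pvMoveA chars (chars.length : Int) i
      = pvMoveB chars (chars.length : Int) (pvNxt chars) (pvKmax chars) i
          (PySem.List.pyGetD chars i ' ') := by
  have hnxt : ∀ m : Int, 0 ≤ m → m < (chars.length : Int) →
      PySem.List.pyGetD (pvNxt chars) m 0 = pvScanR chars m := by
    intro m hm0 hmN
    obtain ⟨t, rfl⟩ : ∃ t : Nat, m = (t : Int) := ⟨m.toNat, by omega⟩
    have ht : t < chars.length := by exact_mod_cast hmN
    rw [pvNxt_eq, PySem.List.pyGetD_natCast, PySem.List.getD_map_range _ _ _ _ ht]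
  simp only [pvMoveA, pvMoveB, pvKmax_eq]
  by_cases h15 : i = 15
  · simp [h15]
  · rw [if_neg h15, if_neg h15]
    by_cases hf : i + 1 < (chars.length : Int) ∧ PySem.List.pyGetD chars (i + 1) ' ' = 'x'
    · rw [if_pos hf, if_pos hf]
    · rw [if_neg hf, if_neg hf]
      have hj : (if i + 1 < (chars.length : Int) then PySem.List.pyGetD (pvNxt chars) (i + 1) 0 else i + 1)
          = pvScanR chars (i + 1) := by
        by_cases h2 : i + 1 < (chars.length : Int)
        · rw [if_pos h2, hnxt _ (by omega) h2]
        · rw [if_neg h2]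
          exact (pvScanR_stop chars _ (by omega)).symm
      rw [hj]
      split_ifs <;> first | rfl | tauto

theorem generate_white_moves_eq (board : String) :
    generate_white_moves board = generate_white_moves_alt board := by
  unfold generate_white_moves generate_white_moves_alt
  simp only [PySem.List.len_eq]
  rw [PySem.List.foldl_append_ite
        (p := fun i => PySem.List.pyGetD board.toList i ' ' = 'w' ∨ PySem.List.pyGetD board.toList i ' ' = 'W')
        (f := fun i => pvMoveA board.toList (board.toList.length : Int) i),
      PySem.List.enumerate_eq_map_pyRange board.toList ' ',
      List.filter_map, List.map_map]
  simp only [List.nil_append]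
  apply List.map_congr_left
  intro i hi
  have hmem := List.mem_filter.mp hi |>.1
  have hb := PySem.List.mem_pyRange_one.mp hmem
  exact pvMove_eq board.toList i hb.1 hb.2

-- ===== VERDICT (by name: the statement is the Claim_ definition above) =====
theorem generate_white_moves_spec : Claim_equal_generate_white_moves := by
  intro board _
  exact generate_white_moves_eq board
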